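-- pv_equiv track=rewrite | github.com/sharifdarjenkyle/data_analyst_test_page | web.py | calculate_expense
-- ===== SOURCE A (Python) =====
-- def calculate_expense(age2):
--   expense_tiers = {
--       (0, 3): 1500,
--       (4, 9): 3000,
--       (10, 13): 4500,
--       (14, 21): 6000,
--       (22, 60): 7500,
--       (61, 100): 9000
--   }
--
--   for age_range, expense in expense_tiers.items():
--     if age_range[0] <= age2 <= age_range[1]:
--       return expense
--
--   return None
-- ===== SOURCE B (Python) =====
-- # B: range check + hand-written binary search over the tier lower bounds
-- # (tiers are contiguous over integer ages 0..100, so the bands are fully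
-- # determined by their lower bounds).
-- _LOWER_BOUNDS = [4, 10, 14, 22, 61]   # lower bounds of every tier after the first
-- _EXPENSES = [1500, 3000, 4500, 6000, 7500, 9000]
--
-- def calculate_expense(age2):
--   if not (0 <= age2 <= 100):
--     return None
--   lo, hi = 0, len(_LOWER_BOUNDS)
--   while lo < hi:
--     mid = (lo + hi) // 2
--     if _LOWER_BOUNDS[mid] <= age2:
--       lo = mid + 1
--     else:
--       hi = mid
--   return _EXPENSES[lo]
-- ===== Notes on version B (the rewrite author's own statement) =====
-- stated objective: alternative
-- what changed: Replaced the per-call linear scan over (lo,hi) tier pairs by a range check plus a hand-written binary search over the sorted tier lower bounds (the tiers are contiguous over 0..100), indexing into a parallel expense array.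
import Mathlib
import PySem

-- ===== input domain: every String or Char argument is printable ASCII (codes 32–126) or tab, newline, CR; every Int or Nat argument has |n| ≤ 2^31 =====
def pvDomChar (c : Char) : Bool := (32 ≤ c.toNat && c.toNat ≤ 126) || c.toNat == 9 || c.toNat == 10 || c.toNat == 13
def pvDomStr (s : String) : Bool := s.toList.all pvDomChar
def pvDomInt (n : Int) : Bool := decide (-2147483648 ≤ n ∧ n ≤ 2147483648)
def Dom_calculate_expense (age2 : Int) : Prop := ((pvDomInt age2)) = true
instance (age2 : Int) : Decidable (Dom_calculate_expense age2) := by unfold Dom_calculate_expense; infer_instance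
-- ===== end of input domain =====

-- B replaces A's per-call linear scan over (lo,hi) tier pairs by a range check
-- plus a binary search over the sorted tier lower bounds (same results).

-- ===== PORT A =====
def pvTiersA : List ((Int × Int) × Int) :=
  [((0, 3), 1500), ((4, 9), 3000), ((10, 13), 4500),
   ((14, 21), 6000), ((22, 60), 7500), ((61, 100), 9000)]

-- the 'for age_range, expense in expense_tiers.items(): if lo <= age2 <= hi: return expense' loop
def pvScanA : List ((Int × Int) × Int) → Int → Option Int
  | [], _ => none
  | p :: rest, a => if p.1.1 ≤ a ∧ a ≤ p.1.2 then some p.2 else pvScanA rest a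

def calculate_expense (age2 : Int) : Option Int :=
  pvScanA pvTiersA age2

-- ===== PORT B =====
def pvLowerBounds : List Int := [4, 10, 14, 22, 61]
def pvExpenses : List Int := [1500, 3000, 4500, 6000, 7500, 9000]

-- the 'while lo < hi' binary-search loop; fuel only makes the loop total
-- (fuel 5 ≥ the number of iterations since hi - lo starts at 5 and shrinks each step)
def pvBisect (a : Int) : Nat → Nat → Nat → Nat
  | 0, lo, _ => lo
  | fuel + 1, lo, hi =>
    if lo < hi then
      let mid := (lo + hi) / 2
      if pvLowerBounds.getD mid 0 ≤ a then pvBisect a fuel (mid + 1) hi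
      else pvBisect a fuel lo mid
    else lo

def calculate_expense_alt (age2 : Int) : Option Int :=
  if 0 ≤ age2 ∧ age2 ≤ 100 then
    some (pvExpenses.getD (pvBisect age2 5 0 pvLowerBounds.length) 0)
  else none

-- ===== PRECONDITION & SPEC =====
def Spec_calculate_expense (age2 : Int) (out : Option Int) : Prop := out = calculate_expense_alt age2
instance (age2 : Int) (out : Option Int) : Decidable (Spec_calculate_expense age2 out) := by unfold Spec_calculate_expense; infer_instance

-- ===== CLAIM (what is proved, stated in full; the proofs are below) =====
def Claim_equal_calculate_expense : Prop := ∀ (age2 : Int), Dom_calculate_expense age2 → Spec_calculate_expense age2 (calculate_expense age2)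

-- ===== LEMMAS AND PROOFS =====

-- ===== VERDICT (by name: the statement is the Claim_ definition above) =====
theorem calculate_expense_spec : Claim_equal_calculate_expense := by
  intro age2 _
  unfold Spec_calculate_expense
  by_cases h : 0 ≤ age2 ∧ age2 ≤ 100
  · obtain ⟨h0, h1⟩ := h
    interval_cases age2 <;> (set_option maxRecDepth 4096 in decide)
  · unfold calculate_expense_alt
    rw [if_neg h]
    simp only [calculate_expense, pvTiersA, pvScanA]
    split_ifs <;> first | omega | rfl
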